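-- pv_equiv track=rewrite | github.com/PabloMayoral/Ejercicios_python_bucles | ejercicios/ejercicios_t4.py | quitaBlancos
-- ===== SOURCE A (Python) =====
-- def quitaBlancos(texto):
--     w = 0
--     casteoLista = list(texto)
--     for i in casteoLista:
--         if i == ' ':
--             casteoLista.pop(w)
--         w +=1
--     texto = "".join(casteoLista)
--     return texto
-- ===== SOURCE B (Python) =====
-- def quitaBlancos(texto):
--     # Remove every space character in one pass.
--     return "".join(c for c in texto if c != ' ')
-- ===== Notes on version B (the rewrite author's own statement) =====
-- stated objective: simpler
-- what changed: Replaces A's mutate-while-iterating list.pop loop by a single filtering pass that removes every space.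
-- intended difference: On strings containing two consecutive spaces, A's pop-while-iterating loop skips the character after each removed space, so every second space of a run survives in A's output, while B removes all spaces, which is the function's evident intent. — e.g. on quitaBlancos("a b"): A returns "a b", B returns "ab"
import Mathlib
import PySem

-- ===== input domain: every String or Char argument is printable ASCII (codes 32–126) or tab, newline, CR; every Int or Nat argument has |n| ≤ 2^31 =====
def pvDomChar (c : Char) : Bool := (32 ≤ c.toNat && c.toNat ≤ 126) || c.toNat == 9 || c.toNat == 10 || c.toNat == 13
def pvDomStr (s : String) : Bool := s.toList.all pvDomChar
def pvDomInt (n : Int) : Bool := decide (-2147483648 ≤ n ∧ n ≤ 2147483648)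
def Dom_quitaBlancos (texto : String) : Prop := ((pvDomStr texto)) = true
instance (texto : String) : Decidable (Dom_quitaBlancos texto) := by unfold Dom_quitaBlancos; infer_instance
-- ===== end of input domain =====

-- B removes every space in one filtering pass; A's pop-while-iterating loop instead
-- skips the character after each removed space, so on runs of two or more spaces A
-- leaves spaces behind — stated below as the intended difference D_.

-- ===== PORT A =====
-- A's `for i in casteoLista` over the list it mutates: j is the iterator's index,
-- w is A's counter (they advance together, exactly as in A); pop(w) = eraseIdx w.
-- fuel only makes the recursion structural: the loop runs at most length-many steps.
def quitaBlancosLoop : Nat → List Char → Nat → Nat → List Char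
  | 0, lst, _, _ => lst
  | fuel + 1, lst, j, w =>
    if _h : j < lst.length then
      quitaBlancosLoop fuel (if lst[j] = ' ' then lst.eraseIdx w else lst) (j + 1) (w + 1)
    else lst

def quitaBlancos (texto : String) : String :=
  String.ofList (quitaBlancosLoop texto.toList.length texto.toList 0 0)

-- ===== PORT B =====
-- B: "".join(c for c in texto if c != ' ') — a single filter over the characters.
def quitaBlancos_alt (texto : String) : String :=
  String.ofList (texto.toList.filter (fun c => c ≠ ' '))

-- ===== PRECONDITION & SPEC =====
-- On strings containing two consecutive spaces A's pop-while-iterating loop skips the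
-- character after each removed space and so leaves every second space of a run in the
-- output (e.g. "a  b" -> "a b"), while B removes all spaces ("ab"), the evident intent.
def hasDoubleSpace : List Char → Bool
  | a :: b :: t => (a = ' ' && b = ' ') || hasDoubleSpace (b :: t)
  | _ => false

def D_quitaBlancos (texto : String) : Prop := hasDoubleSpace texto.toList = true
instance (texto : String) : Decidable (D_quitaBlancos texto) := by unfold D_quitaBlancos; infer_instance

def Spec_quitaBlancos (texto : String) (out : String) : Prop := ¬ D_quitaBlancos texto → out = quitaBlancos_alt texto
instance (texto : String) (out : String) : Decidable (Spec_quitaBlancos texto out) := by unfold Spec_quitaBlancos; infer_instance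

def pvDiffWitness_quitaBlancos : String := "a  b"
def pvDiffWitnessOut_quitaBlancos : String × String := ("a b", "ab")

-- ===== CLAIM (what is proved, stated in full; the proofs are below) =====
def Claim_unchanged_quitaBlancos : Prop := ∀ (texto : String), Dom_quitaBlancos texto → Spec_quitaBlancos texto (quitaBlancos texto)
def Claim_changed_quitaBlancos : Prop := Dom_quitaBlancos (pvDiffWitness_quitaBlancos) ∧ D_quitaBlancos (pvDiffWitness_quitaBlancos) ∧ quitaBlancos (pvDiffWitness_quitaBlancos) = pvDiffWitnessOut_quitaBlancos.1 ∧ quitaBlancos_alt (pvDiffWitness_quitaBlancos) = pvDiffWitnessOut_quitaBlancos.2 ∧ pvDiffWitnessOut_quitaBlancos.1 ≠ pvDiffWitnessOut_quitaBlancos.2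
def Claim_exact_quitaBlancos : Prop := ∀ (texto : String), Dom_quitaBlancos texto → D_quitaBlancos texto → quitaBlancos texto ≠ quitaBlancos_alt texto

-- ===== LEMMAS AND PROOFS =====

-- What A's loop computes on the remaining suffix: a space deletes itself and the
-- following (never examined) character is kept.
def quitaBlancosGo : List Char → List Char
  | [] => []
  | c :: rest =>
    if c = ' ' then
      match rest with
      | [] => []
      | d :: rest' => d :: quitaBlancosGo rest'
    else c :: quitaBlancosGo rest

-- A's loop with w = j equals "kept prefix ++ Go on the rest".
theorem quitaBlancosLoop_eq (fuel : Nat) :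
    ∀ (lst : List Char) (j : Nat), lst.length - j ≤ fuel →
      quitaBlancosLoop fuel lst j j = lst.take j ++ quitaBlancosGo (lst.drop j) := by
  induction fuel with
  | zero =>
    intro lst j hle
    have hj : lst.length ≤ j := by omega
    simp [quitaBlancosLoop, List.take_of_length_le hj, List.drop_of_length_le hj,
      quitaBlancosGo]
  | succ n ih =>
    intro lst j hle
    rw [quitaBlancosLoop]
    by_cases h : j < lst.length
    · rw [dif_pos h]
      have hdrop : lst.drop j = lst[j] :: lst.drop (j + 1) := List.drop_eq_getElem_cons h
      by_cases hsp : lst[j] = ' '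
      · rw [if_pos hsp]
        have herase : lst.eraseIdx j = lst.take j ++ lst.drop (j + 1) :=
          List.eraseIdx_eq_take_drop_succ lst j
        have hlen : (lst.eraseIdx j).length = lst.length - 1 := by
          rw [List.length_eraseIdx]; simp [h]
        have htj : (lst.take j).length = j := by rw [List.length_take]; omega
        rw [ih (lst.eraseIdx j) (j + 1) (by omega), herase]
        cases hrest : lst.drop (j + 1) with
        | nil =>
          rw [List.append_nil,
            List.take_of_length_le (by omega : (lst.take j).length ≤ j + 1),
            List.drop_of_length_le (by omega : (lst.take j).length ≤ j + 1)]
          conv_rhs => rw [hdrop, hrest, quitaBlancosGo.eq_def]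
          simp [hsp, quitaBlancosGo]
        | cons d rest' =>
          have h1 : (lst.take j ++ d :: rest').take (j + 1) = lst.take j ++ [d] := by
            rw [← htj]; simp [List.take_append]
          have h2 : (lst.take j ++ d :: rest').drop (j + 1) = rest' := by
            rw [← htj]; simp [List.drop_append]
          rw [h1, h2]
          conv_rhs => rw [hdrop, hrest, quitaBlancosGo.eq_def]
          simp [hsp]
      · rw [if_neg hsp]
        rw [ih lst (j + 1) (by omega)]
        have htake : lst.take (j + 1) = lst.take j ++ [lst[j]] := by
          rw [List.take_add_one]
          simp [List.getElem?_eq_getElem h]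
        conv_rhs => rw [hdrop, quitaBlancosGo.eq_def]
        rw [htake, List.append_assoc]
        simp [hsp]
    · rw [dif_neg h]
      have hj : lst.length ≤ j := by omega
      simp [List.take_of_length_le hj, List.drop_of_length_le hj, quitaBlancosGo]

-- Without two consecutive spaces, A's skip-one behaviour coincides with filtering.
theorem go_eq_filter : ∀ (l : List Char), hasDoubleSpace l = false →
    quitaBlancosGo l = l.filter (fun c => c ≠ ' ') := by
  intro l
  induction l using quitaBlancosGo.induct with
  | case1 => intro _; simp [quitaBlancosGo]
  | case2 => intro _; simp [quitaBlancosGo]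
  | case3 d rest' ih =>
    intro hdd
    have hdsp : ¬ d = ' ' := by
      intro h; subst h; simp [hasDoubleSpace] at hdd
    have hrest' : hasDoubleSpace rest' = false := by
      cases rest' with
      | nil => simp [hasDoubleSpace]
      | cons e t =>
        simp [hasDoubleSpace] at hdd
        simp [hdd]
    simp [quitaBlancosGo, hdsp, List.filter, ih hrest']
  | case4 c rest hc ih =>
    intro hdd
    have hrest : hasDoubleSpace rest = false := by
      cases rest with
      | nil => simp [hasDoubleSpace]
      | cons e t =>
        simp [hasDoubleSpace] at hdd
        simp [hdd]
    conv_lhs => rw [quitaBlancosGo.eq_def]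
    simp [hc, List.filter, ih hrest]

-- With two consecutive spaces, A's output keeps a space.
theorem mem_go_of_dd : ∀ (l : List Char), hasDoubleSpace l = true →
    (' ' : Char) ∈ quitaBlancosGo l := by
  intro l
  induction l using quitaBlancosGo.induct with
  | case1 => intro h; simp [hasDoubleSpace] at h
  | case2 => intro h; simp [hasDoubleSpace] at h
  | case3 d rest' ih =>
    intro hdd
    by_cases hdsp : d = ' '
    · subst hdsp
      conv_lhs => rw [quitaBlancosGo.eq_def]
      simp
    · have hrest' : hasDoubleSpace rest' = true := by
        cases rest' with
        | nil => simp [hasDoubleSpace, hdsp] at hdd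
        | cons e t => simpa [hasDoubleSpace, hdsp] using hdd
      conv_lhs => rw [quitaBlancosGo.eq_def]
      simp [ih hrest']
  | case4 c rest hc ih =>
    intro hdd
    have hrest : hasDoubleSpace rest = true := by
      cases rest with
      | nil => simp [hasDoubleSpace] at hdd
      | cons e t => simpa [hasDoubleSpace, hc] using hdd
    conv_lhs => rw [quitaBlancosGo.eq_def]
    simp [hc, ih hrest]

theorem quitaBlancos_eq_go (texto : String) :
    quitaBlancos texto = String.ofList (quitaBlancosGo texto.toList) := by
  unfold quitaBlancos
  rw [quitaBlancosLoop_eq texto.toList.length texto.toList 0 (by omega)]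
  simp

-- ===== VERDICT (by name: the statements are the Claim_ definitions above) =====
theorem quitaBlancos_spec : Claim_unchanged_quitaBlancos := by
  intro texto _ hnd
  unfold quitaBlancos_alt
  rw [quitaBlancos_eq_go, go_eq_filter]
  unfold D_quitaBlancos at hnd
  simpa using hnd

theorem quitaBlancos_changed : Claim_changed_quitaBlancos := by
  unfold Claim_changed_quitaBlancos; decide

theorem quitaBlancos_tight : Claim_exact_quitaBlancos := by
  intro texto _ hd heq
  unfold D_quitaBlancos at hd
  have hmem : (' ' : Char) ∈ quitaBlancosGo texto.toList := mem_go_of_dd _ hd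
  rw [quitaBlancos_eq_go] at heq
  unfold quitaBlancos_alt at heq
  rw [String.ofList_injective heq] at hmem
  simp [List.mem_filter] at hmem
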